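-- pv_equiv track=rewrite | github.com/sarathchandra706/competitive-programming | 04-recursion_powersof3ton-Python/recursion_powersof3ton.py | powerof
-- ===== SOURCE A (Python) =====
-- def powerof(n,c,l):
--   if n < 1:
--       return l
--   else:
--       n = n//3
--       c+=1
--       num = 3
--       return powerof(n,c,l+[n**c])
-- ===== SOURCE B (Python) =====
-- def powerof(n, c, l):
--     # Collect the chain of quotients first, then attach exponents in one comprehension.
--     qs = []
--     while n >= 1:
--         n //= 3
--         qs.append(n)
--     return l + [q ** (c + 1 + i) for i, q in enumerate(qs)]
-- ===== Notes on version B (the rewrite author's own statement) =====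
-- stated objective: simpler
-- what changed: Replaced A's accumulator recursion (which carries c and the growing list through each call) by an iterative two-phase version: a while-loop first collects the chain of quotients n//3, n//9, ..., then one comprehension with enumerate attaches the exponents and appends to l.
-- outside the precondition, e.g. on powerof(3, -2, []): A returns [1.0, 1], B returns [1.0, 1]; on powerof(5, -3, []): A raises ZeroDivisionError, B raises ZeroDivisionError
import Mathlib
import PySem

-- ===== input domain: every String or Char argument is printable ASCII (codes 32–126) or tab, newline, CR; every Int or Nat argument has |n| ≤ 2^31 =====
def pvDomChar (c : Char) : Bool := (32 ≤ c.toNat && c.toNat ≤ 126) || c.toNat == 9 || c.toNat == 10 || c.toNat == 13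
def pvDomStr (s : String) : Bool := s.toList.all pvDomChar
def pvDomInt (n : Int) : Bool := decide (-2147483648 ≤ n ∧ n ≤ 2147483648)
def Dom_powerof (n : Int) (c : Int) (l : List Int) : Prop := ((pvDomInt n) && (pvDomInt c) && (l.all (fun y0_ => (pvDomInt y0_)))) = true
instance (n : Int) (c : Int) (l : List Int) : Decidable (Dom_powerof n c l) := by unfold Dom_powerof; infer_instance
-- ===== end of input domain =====

-- B is an iterative two-phase rewrite (collect the quotient chain, then map powers) of A's
-- accumulator recursion; same cost, plainer structure ('simpler'), return value only.

-- ===== PORT A =====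
-- Python's b ** e for int b and e ≥ 0. A negative exponent (Python: float result or
-- ZeroDivisionError) is excluded by Pre_powerof; the 0 there is never the claimed value.
def pyPow (b : Int) (e : Int) : Int := if e < 0 then 0 else b ^ e.toNat

def powerof (n : Int) (c : Int) (l : List Int) : List Int :=
  if n < 1 then l
  else
    let n' := PySem.Int.floordiv n 3
    powerof n' (c + 1) (l ++ [pyPow n' (c + 1)])
termination_by n.toNat
decreasing_by
  simp only [PySem.Int.floordiv_eq_ediv_of_pos (by norm_num : (0:Int) < 3)]
  omega

-- ===== PORT B =====
-- phase 1 of Source B: the while-loop collecting successive quotients n//3, n//9, …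
def quotChain (n : Int) : List Int :=
  if n < 1 then []
  else
    let n' := PySem.Int.floordiv n 3
    n' :: quotChain n'
termination_by n.toNat
decreasing_by
  simp only [PySem.Int.floordiv_eq_ediv_of_pos (by norm_num : (0:Int) < 3)]
  omega

def powerof_alt (n : Int) (c : Int) (l : List Int) : List Int :=
  l ++ (PySem.List.enumerate (quotChain n)).map (fun p => pyPow p.2 (c + 1 + p.1))

-- ===== PRECONDITION & SPEC =====
-- Pre_ excludes inputs with n ≥ 1 and c < -1: there the Python A returns a list containing
-- floats (or raises ZeroDivisionError at 0 ** negative), not a value of type list[int].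
def Pre_powerof (n : Int) (c : Int) (l : List Int) : Prop := 1 ≤ n → -1 ≤ c
instance (n : Int) (c : Int) (l : List Int) : Decidable (Pre_powerof n c l) := by unfold Pre_powerof; infer_instance
def pvWitness_powerof : Int × Int × List Int := (9, 0, [5])

def Spec_powerof (n : Int) (c : Int) (l : List Int) (out : List Int) : Prop := out = powerof_alt n c l
instance (n : Int) (c : Int) (l : List Int) (out : List Int) : Decidable (Spec_powerof n c l out) := by unfold Spec_powerof; infer_instance

-- ===== CLAIM (what is proved, stated in full; the proofs are below) =====
def Claim_equal_powerof : Prop := ∀ (n : Int) (c : Int) (l : List Int), Dom_powerof n c l → Pre_powerof n c l → Spec_powerof n c l (powerof n c l)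

-- ===== LEMMAS AND PROOFS =====

-- A's accumulator recursion equals "append the powers of the quotient chain", for any
-- enumeration start s (the generalization that makes the induction go through).
theorem powerof_eq_key (m : Nat) : ∀ (n c : Int) (l : List Int) (s : Int), n.toNat = m →
    powerof n c l = l ++ (PySem.List.enumerate (quotChain n) s).map (fun p => pyPow p.2 (c + 1 + (p.1 - s))) := by
  induction m using Nat.strong_induction_on with
  | _ m ih =>
    intro n c l s hm
    rw [powerof, quotChain]
    by_cases h : n < 1
    · simp [h, PySem.List.enumerate_nil]
    · simp only [h, if_false]
      set n' := PySem.Int.floordiv n 3 with hn'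
      have hdec : n'.toNat < m := by
        have := PySem.Int.floordiv_eq_ediv_of_pos (by norm_num : (0:Int) < 3) (a := n)
        omega
      rw [ih n'.toNat hdec n' (c + 1) (l ++ [pyPow n' (c + 1)]) (s + 1) rfl]
      rw [PySem.List.enumerate_cons]
      simp only [List.map_cons, List.append_assoc, List.singleton_append, sub_self, add_zero]
      congr 1
      congr 1
      apply List.map_congr_left
      intro p _
      have : c + 1 + 1 + (p.1 - (s + 1)) = c + 1 + (p.1 - s) := by ring
      rw [this]

-- ===== VERDICT (by name: the statement is the Claim_ definition above) =====
theorem powerof_spec : Claim_equal_powerof := by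
  intro n c l _ _
  unfold Spec_powerof powerof_alt
  rw [powerof_eq_key n.toNat n c l 0 rfl]
  congr 1
  apply List.map_congr_left
  intro p _
  rw [sub_zero]
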